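-- pv_equiv track=rewrite | github.com/Exoldy/functional-programming-in-scala-second | scripts/pdf_to_md.py | context_titles_for_page
-- ===== SOURCE A (Python) =====
-- def context_titles_for_page(page_number: int, toc: list[list[int | str]]) -> list[str]:
--     active: dict[int, str] = {}
--     for level, title, toc_page in toc:
--         if toc_page > page_number:
--             break
--         active[level] = str(title)
--         active = {lvl: value for lvl, value in active.items() if lvl <= level}
--     return [active[level] for level in sorted(active)]
-- ===== SOURCE B (Python) =====
-- def context_titles_for_page(page_number: int, toc: list[list[int | str]]) -> list[str]:
--     stack: list[tuple[int, str]] = []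
--     for level, title, toc_page in toc:
--         if toc_page > page_number:
--             break
--         while stack and stack[-1][0] >= level:
--             stack.pop()
--         stack.append((level, str(title)))
--     return [title for _, title in stack]
-- ===== Notes on version B (the rewrite author's own statement) =====
-- stated objective: simpler
-- what changed: Replaces the level-keyed dict that is rebuilt by a filtering comprehension each step and sorted at the end by a stack of (level, title) pairs kept strictly increasing by level (pop while top level >= current, push), so the result is read off the stack with no rebuild and no final sort.
import Mathlib
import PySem

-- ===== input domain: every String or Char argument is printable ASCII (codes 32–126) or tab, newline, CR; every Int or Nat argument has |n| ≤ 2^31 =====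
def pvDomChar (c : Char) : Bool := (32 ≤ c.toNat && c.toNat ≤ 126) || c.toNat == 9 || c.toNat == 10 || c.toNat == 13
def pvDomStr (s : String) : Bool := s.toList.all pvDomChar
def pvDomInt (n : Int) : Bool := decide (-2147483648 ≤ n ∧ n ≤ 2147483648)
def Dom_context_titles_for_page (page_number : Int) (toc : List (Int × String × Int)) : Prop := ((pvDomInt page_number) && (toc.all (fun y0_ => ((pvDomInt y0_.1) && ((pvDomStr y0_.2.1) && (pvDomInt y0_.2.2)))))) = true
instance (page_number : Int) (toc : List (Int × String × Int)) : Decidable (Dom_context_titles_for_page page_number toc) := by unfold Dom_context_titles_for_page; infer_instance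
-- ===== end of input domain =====

-- B replaces A's level-keyed dict (rebuilt by a filtering comprehension each step, sorted at the
-- end) with a stack of (level, title) pairs kept strictly increasing by level: simpler, no final sort.

-- ===== PORT A =====
-- the for-loop with break over toc; str(title) is the identity here since title : String
def aLoop (page_number : Int) : List (Int × String × Int) → PySem.Dict Int String → PySem.Dict Int String
  | [], active => active
  | (level, title, toc_page) :: rest, active =>
    if toc_page > page_number then active
    else aLoop page_number rest
      (PySem.Dict.ofList (((active.insert level title).items).filter (fun p => decide (p.1 ≤ level))))

-- [active[level] for level in sorted(active)]: every looked-up key is a key of active, so the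
-- getD default "" is never used (the lookup is exact)
def context_titles_for_page (page_number : Int) (toc : List (Int × String × Int)) : List String :=
  let active := aLoop page_number toc PySem.Dict.empty
  (PySem.List.sorted active.keys (fun k => k)).map (fun k => active.getD k "")

-- ===== PORT B =====
-- Source B's stack is stored top-at-head here (Python appends/pops at the end); the final reverse
-- restores Source B's bottom-to-top order
def popGE (level : Int) : List (Int × String) → List (Int × String)
  | [] => []
  | (l, t) :: rest => if level ≤ l then popGE level rest else (l, t) :: rest

def bLoop (page_number : Int) : List (Int × String × Int) → List (Int × String) → List (Int × String)
  | [], st => st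
  | (level, title, toc_page) :: rest, st =>
    if toc_page > page_number then st
    else bLoop page_number rest ((level, title) :: popGE level st)

def context_titles_for_page_alt (page_number : Int) (toc : List (Int × String × Int)) : List String :=
  ((bLoop page_number toc []).reverse).map (fun p => p.2)

-- ===== PRECONDITION & SPEC =====
def Spec_context_titles_for_page (page_number : Int) (toc : List (Int × String × Int)) (out : List String) : Prop := out = context_titles_for_page_alt page_number toc
instance (page_number : Int) (toc : List (Int × String × Int)) (out : List String) : Decidable (Spec_context_titles_for_page page_number toc out) := by unfold Spec_context_titles_for_page; infer_instance

-- ===== CLAIM (what is proved, stated in full; the proofs are below) =====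
def Claim_equal_context_titles_for_page : Prop := ∀ (page_number : Int) (toc : List (Int × String × Int)), Dom_context_titles_for_page page_number toc → Spec_context_titles_for_page page_number toc (context_titles_for_page page_number toc)

-- ===== LEMMAS AND PROOFS =====

-- dict comprehension over pairs with distinct keys keeps exactly those pairs
theorem ofList_items_of_nodup {ν : Type} (zs : List (Int × ν))
    (h : (zs.map (fun p => p.1)).Nodup) : (PySem.Dict.ofList zs).items = zs := by
  have := PySem.Dict.items_foldl_insert_fresh zs (fun p => p.1) (fun p => p.2) PySem.Dict.empty
    (by intro a _; simp [PySem.Dict.contains_empty]) h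
  simpa [PySem.Dict.ofList, PySem.Dict.update] using this

-- popping while top level ≥ l from a strictly decreasing stack is filtering to levels < l
theorem popGE_eq_filter (l : Int) (zs : List (Int × String))
    (h : zs.Pairwise (fun a b => b.1 < a.1)) :
    popGE l zs = zs.filter (fun p => decide (p.1 < l)) := by
  induction zs with
  | nil => rfl
  | cons a rest ih =>
    rw [List.pairwise_cons] at h
    by_cases hl : l ≤ a.1
    · have : ¬ a.1 < l := by omega
      simp [popGE, hl, ih h.2, this]
    · rw [not_le] at hl
      have hrest : rest.filter (fun p => decide (p.1 < l)) = rest := by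
        rw [List.filter_eq_self]
        intro p hp
        have := h.1 p hp
        simp; omega
      simp [popGE, hl, not_le.mpr hl, hrest]

theorem insert_cons_items {ν : Type} (l : Int) (t : ν) (a : Int × ν) (rest : List (Int × ν))
    (ha : a.1 ≠ l) :
    ((PySem.Dict.mk (a :: rest)).insert l t).items
      = a :: ((PySem.Dict.mk rest).insert l t).items := by
  have hne : (a.1 == l) = false := by simpa using ha
  by_cases hc : (PySem.Dict.mk rest).contains l = true
  · rw [PySem.Dict.items_insert, PySem.Dict.items_insert, if_pos, if_pos hc]
    · simp [ha]
    · simpa [PySem.Dict.contains_mk, hne] using hc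
  · rw [PySem.Dict.items_insert, PySem.Dict.items_insert, if_neg, if_neg hc]
    · simp
    · simp only [PySem.Dict.contains_mk] at hc ⊢
      simp_all
-- insert-then-filter on a strictly increasing items list drops the deeper levels and puts (l,t) last
theorem insert_filter_eq (l : Int) (t : String) (ys : List (Int × String))
    (h : ys.Pairwise (fun a b => a.1 < b.1)) :
    (((PySem.Dict.mk ys).insert l t).items).filter (fun p => decide (p.1 ≤ l))
      = ys.filter (fun p => decide (p.1 < l)) ++ [(l, t)] := by
  induction ys with
  | nil =>
    rw [PySem.Dict.items_insert, if_neg (by simp [PySem.Dict.contains_mk])]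
    simp
  | cons a rest ih =>
    rw [List.pairwise_cons] at h
    by_cases hal : a.1 = l
    · -- overwrite in place; everything after a has level > l and is filtered away
      have hcont : (PySem.Dict.mk (a :: rest)).contains l = true := by
        simp [PySem.Dict.contains_mk, hal]
      have hmap : rest.map (fun p => if (p.1 == l) = true then (l, t) else p) = rest := by
        have hcong : rest.map (fun p => if (p.1 == l) = true then (l, t) else p)
            = rest.map id := by
          apply List.map_congr_left
          intro p hp
          have := h.1 p hp
          have hpl : (p.1 == l) = false := by simp; omega
          simp [hpl]
        simpa using hcong
      have hrest : rest.filter (fun p => decide (p.1 ≤ l)) = [] := by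
        rw [List.filter_eq_nil_iff]
        intro p hp
        have := h.1 p hp
        simp; omega
      have hrest2 : rest.filter (fun p => decide (p.1 < l)) = [] := by
        rw [List.filter_eq_nil_iff]
        intro p hp
        have := h.1 p hp
        simp; omega
      rw [PySem.Dict.items_insert, if_pos hcont, List.map_cons, hmap]
      have haeq : (if (a.1 == l) = true then (l, t) else a) = (l, t) := by simp [hal]
      rw [haeq, List.filter_cons, List.filter_cons]
      simp [hrest, hrest2, hal]
    · rw [insert_cons_items l t a rest hal, List.filter_cons, List.filter_cons]
      by_cases hle : a.1 ≤ l
      · have hlt : a.1 < l := lt_of_le_of_ne hle hal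
        simp [hle, hlt, ih h.2]
      · have hlt : ¬ a.1 < l := by omega
        simp [hle, hlt, ih h.2]

-- the two loops in lockstep: A's dict items are B's stack read bottom-to-top, strictly increasing
theorem loop_rel (pn : Int) (toc : List (Int × String × Int)) :
    ∀ (ys : List (Int × String)), ys.Pairwise (fun a b => a.1 < b.1) →
      (aLoop pn toc (PySem.Dict.mk ys)).items = (bLoop pn toc ys.reverse).reverse ∧
      (aLoop pn toc (PySem.Dict.mk ys)).items.Pairwise (fun a b => a.1 < b.1) := by
  induction toc with
  | nil => intro ys h; simp [aLoop, bLoop, h]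
  | cons e rest ih =>
    obtain ⟨level, title, tpage⟩ := e
    intro ys h
    by_cases hb : tpage > pn
    · simp [aLoop, bLoop, hb, h]
    · have hpair' : (ys.filter (fun p => decide (p.1 < level)) ++ [(level, title)]).Pairwise
          (fun a b => a.1 < b.1) := by
        rw [List.pairwise_append]
        refine ⟨h.filter _, by simp, ?_⟩
        intro a ha b hb'
        rcases List.mem_singleton.mp hb' with rfl
        have := List.of_mem_filter ha
        simpa using this
      have hnd : ((ys.filter (fun p => decide (p.1 < level)) ++ [(level, title)]).map
          (fun p => p.1)).Nodup := by
        exact List.pairwise_map.mpr (hpair'.imp (fun hab => ne_of_lt hab))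
      have hofl : PySem.Dict.ofList ((((PySem.Dict.mk ys).insert level title).items).filter
            (fun p => decide (p.1 ≤ level)))
          = PySem.Dict.mk (ys.filter (fun p => decide (p.1 < level)) ++ [(level, title)]) := by
        apply PySem.Dict.ext
        rw [insert_filter_eq level title ys h, ofList_items_of_nodup _ hnd]
      have hpop : popGE level ys.reverse = (ys.filter (fun p => decide (p.1 < level))).reverse := by
        rw [popGE_eq_filter level ys.reverse (by rwa [List.pairwise_reverse]),
          ← List.filter_reverse]
      have hstk : (level, title) :: popGE level ys.reverse
          = (ys.filter (fun p => decide (p.1 < level)) ++ [(level, title)]).reverse := by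
        rw [hpop]; simp
      rw [show aLoop pn ((level, title, tpage) :: rest) (PySem.Dict.mk ys)
            = aLoop pn rest (PySem.Dict.ofList ((((PySem.Dict.mk ys).insert level title).items).filter
              (fun p => decide (p.1 ≤ level)))) by simp [aLoop, hb],
          show bLoop pn ((level, title, tpage) :: rest) ys.reverse
            = bLoop pn rest ((level, title) :: popGE level ys.reverse) by simp [bLoop, hb],
          hofl, hstk]
      exact ih _ hpair'

-- ===== VERDICT (by name: the statement is the Claim_ definition above) =====
theorem context_titles_for_page_spec : Claim_equal_context_titles_for_page := by
  intro pn toc _dom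
  unfold Spec_context_titles_for_page context_titles_for_page context_titles_for_page_alt
  obtain ⟨hitems, hpair⟩ := loop_rel pn toc [] (by simp)
  simp only [List.reverse_nil] at hitems
  set d := aLoop pn toc (PySem.Dict.mk []) with hd
  have hkeys : d.keys.Pairwise (fun a b => a < b) := by
    have := hpair
    simpa [PySem.Dict.keys, List.pairwise_map] using this.imp (fun hab => hab)
  have hnd : d.keys.Nodup := hkeys.imp (fun hab => ne_of_lt hab)
  have hsorted : PySem.List.sorted d.keys (fun k => k) = d.keys :=
    PySem.List.sorted_eq_self_of_pairwise d.keys (fun k => k)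
      (hkeys.imp (fun hab => le_of_lt hab))
  have hvals : d.keys.map (fun k => d.getD k "") = d.items.map (fun p => p.2) := by
    conv_rhs => rw [PySem.Dict.items_eq_map_keys d hnd ""]
    simp
  show (PySem.List.sorted d.keys (fun k => k)).map (fun k => d.getD k "") = _
  rw [hsorted, hvals, hitems]
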